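-- pv_equiv track=rewrite | github.com/abhinav-gautam/leetcode | Topicwise/Bit Manipulation/3827. Count Monobit Integers.py | countMonobit
-- ===== SOURCE A (Python) =====
-- def countMonobit(n: int) -> int:
--     count = 0
--     for i in range(n + 1):
--         bits = bin(i)
--         unique = set(list(bits[2:]))
--         if len(unique) == 1:
--             count += 1
--     return count
-- ===== SOURCE B (Python) =====
-- def countMonobit(n: int) -> int:
--     # Monobit integers in [0, n] are 0 and the all-ones numbers 2^k - 1 (k >= 1):
--     # count them directly instead of testing every integer.
--     if n < 0:
--         return 0
--     count = 1  # zero itself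
--     v = 1      # 2^1 - 1
--     while v <= n:
--         count += 1
--         v = 2 * v + 1
--     return count
-- ===== Notes on version B (the rewrite author's own statement) =====
-- stated objective: faster
-- what changed: Instead of testing the binary digits of every integer in [0, n], B counts the monobit integers directly: 1 for zero plus one for each all-ones number 2^k - 1 <= n, iterating only over powers of two.
import Mathlib
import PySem

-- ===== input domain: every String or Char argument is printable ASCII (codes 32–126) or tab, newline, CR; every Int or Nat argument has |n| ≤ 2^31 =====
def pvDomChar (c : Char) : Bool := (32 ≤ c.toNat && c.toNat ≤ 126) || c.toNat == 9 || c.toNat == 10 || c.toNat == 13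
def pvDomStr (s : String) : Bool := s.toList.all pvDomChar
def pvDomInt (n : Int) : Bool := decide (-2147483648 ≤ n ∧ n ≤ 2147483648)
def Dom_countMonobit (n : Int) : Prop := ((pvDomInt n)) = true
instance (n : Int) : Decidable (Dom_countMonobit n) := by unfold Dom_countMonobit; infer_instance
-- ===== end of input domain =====

-- B replaces A's per-integer binary-digit test over all of 0..n by directly counting
-- zero plus the all-ones numbers 2^k - 1 ≤ n (objective: faster).

-- ===== PORT A =====
-- binary digits of a natural number, most significant first (bin(i) without the '0b' prefix; [] for 0)
def pyBinDigits : Nat → List Char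
  | 0 => []
  | (i+1) => pyBinDigits ((i+1)/2) ++ [if (i+1) % 2 == 1 then '1' else '0']
decreasing_by exact Nat.div_lt_self (Nat.succ_pos i) one_lt_two

-- bin(i) as a list of characters; exact for i ≥ 0 (the only arguments A's loop produces)
def pyBin (i : Int) : List Char := ['0', 'b'] ++ (if i = 0 then ['0'] else pyBinDigits i.toNat)

def countMonobit (n : Int) : Int :=
  (PySem.List.pyRange 0 (n + 1) 1).foldl
    (fun count i =>
      let bits := pyBin i
      let unique : PySem.Set Char := PySem.Set.ofList (PySem.List.slice bits (some 2) none)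
      if PySem.Set.len unique == 1 then count + 1 else count) 0

-- ===== PORT B =====
-- the while loop of Source B; v is the all-ones value 2^k - 1, always a natural number
def loopB (n : Int) (v : Nat) (c : Int) : Int :=
  if (v : Int) ≤ n then loopB n (2 * v + 1) (c + 1) else c
termination_by ((n + 1) - (v : Int)).toNat
decreasing_by omega

def countMonobit_alt (n : Int) : Int :=
  if n < 0 then 0 else loopB n 1 1

-- ===== PRECONDITION & SPEC =====
def Spec_countMonobit (n : Int) (out : Int) : Prop := out = countMonobit_alt n
instance (n : Int) (out : Int) : Decidable (Spec_countMonobit n out) := by unfold Spec_countMonobit; infer_instance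

-- ===== CLAIM (what is proved, stated in full; the proofs are below) =====
def Claim_equal_countMonobit : Prop := ∀ (n : Int), Dom_countMonobit n → Spec_countMonobit n (countMonobit n)

-- ===== LEMMAS AND PROOFS =====

-- unfolding lemma for pyBinDigits at a positive argument
lemma pyBinDigits_pos (i : Nat) (h : 0 < i) :
    pyBinDigits i = pyBinDigits (i / 2) ++ [if i % 2 == 1 then '1' else '0'] := by
  cases i with
  | zero => omega
  | succ j => rw [pyBinDigits]

lemma pyBinDigits_pow (k : Nat) : pyBinDigits (2 ^ k - 1) = List.replicate k '1' := by
  induction k with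
  | zero => simp [pyBinDigits]
  | succ k ih =>
    have h1 : 1 ≤ 2 ^ k := Nat.one_le_two_pow
    have h2 : 2 ^ (k + 1) = 2 * 2 ^ k := by rw [pow_succ]; ring
    rw [pyBinDigits_pos (2 ^ (k + 1) - 1) (by omega)]
    have hdiv : (2 ^ (k + 1) - 1) / 2 = 2 ^ k - 1 := by omega
    have hmod : (2 ^ (k + 1) - 1) % 2 = 1 := by omega
    rw [hdiv, hmod, ih]
    simp [List.replicate_succ']

lemma pyBinDigits_rev (i : Nat) : ∀ (k : Nat), pyBinDigits i = List.replicate k '1' → i + 1 = 2 ^ k := by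
  induction i using Nat.strong_induction_on with
  | _ i ih =>
    intro k hk
    rcases Nat.eq_zero_or_pos i with hi | hi
    · subst hi
      have : (List.replicate k '1').length = 0 := by rw [← hk]; simp [pyBinDigits]
      simp at this
      simp [this]
    · rw [pyBinDigits_pos i hi] at hk
      have hmem : ∀ x ∈ pyBinDigits (i / 2) ++ [if i % 2 == 1 then '1' else '0'], x = '1' := by
        rw [hk]; intro x hx; exact List.eq_of_mem_replicate hx
      have hmod : i % 2 = 1 := by
        by_contra hm
        have h0 : (if i % 2 == 1 then '1' else '0') = '0' := by
          have : (i % 2 == 1) = false := by simp; omega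
          rw [this]; simp
        have := hmem (if i % 2 == 1 then '1' else '0')
          (List.mem_append_right _ (List.mem_singleton_self _))
        rw [h0] at this
        exact absurd this (by decide)
      have hrep : pyBinDigits (i / 2) = List.replicate (pyBinDigits (i / 2)).length '1' :=
        List.eq_replicate_of_mem (fun x hx => hmem x (List.mem_append_left _ hx))
      have ihh := ih (i / 2) (Nat.div_lt_self hi one_lt_two) _ hrep
      have hklen : k = (pyBinDigits (i / 2)).length + 1 := by
        have := congrArg List.length hk
        simp at this
        omega
      have hpow : 2 ^ k = 2 ^ (pyBinDigits (i / 2)).length * 2 := by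
        rw [hklen, pow_succ]
      omega

lemma one_mem_pyBinDigits (i : Nat) (h : 0 < i) : '1' ∈ pyBinDigits i := by
  induction i using Nat.strong_induction_on with
  | _ i ih =>
    rw [pyBinDigits_pos i h]
    rcases Nat.eq_zero_or_pos (i / 2) with h2 | h2
    · have : i = 1 := by omega
      subst this
      simp
    · exact List.mem_append_left _ (ih (i / 2) (Nat.div_lt_self h one_lt_two) h2)

-- a nonempty list of equal elements has a one-element set
lemma ofList_const {c : Char} : ∀ (l : List Char), (∀ x ∈ l, x = c) → l ≠ [] → PySem.Set.ofList l = [c] := by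
  have key : ∀ (l : List Char), (∀ x ∈ l, x = c) → List.foldl PySem.Set.add [c] l = [c] := by
    intro l
    induction l with
    | nil => intro _; rfl
    | cons a t iht =>
      intro hall
      have ha : a = c := hall a (by simp)
      subst ha
      have : PySem.Set.add [a] a = [a] := by simp [PySem.Set.add, PySem.Set.contains]
      simp only [List.foldl_cons, this]
      exact iht (fun x hx => hall x (by simp [hx]))
  intro l hall hne
  cases l with
  | nil => exact absurd rfl hne
  | cons a t =>
    have ha : a = c := hall a (by simp)
    subst ha
    have h0 : PySem.Set.add PySem.Set.empty a = [a] := by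
      simp [PySem.Set.add, PySem.Set.contains, PySem.Set.empty]
    simp only [PySem.Set.ofList, List.foldl_cons, h0]
    exact key t (fun x hx => hall x (by simp [hx]))

-- the whole per-element test of A, as a predicate
def isMonoB (i : Int) : Bool :=
  PySem.Set.len (PySem.Set.ofList (PySem.List.slice (pyBin i) (some 2) none)) == 1

def isMonoN (k : Nat) : Bool := isMonoB (k : Int)

lemma slice_pyBin (i : Int) :
    PySem.List.slice (pyBin i) (some 2) none = (if i = 0 then ['0'] else pyBinDigits i.toNat) := by
  have h := PySem.List.slice_from (xs := pyBin i) (a := 2) (by omega)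
  rw [h]
  rfl

lemma isMonoN_iff (i : Nat) : isMonoN i = true ↔ ∃ k, i + 1 = 2 ^ k := by
  unfold isMonoN isMonoB
  rw [slice_pyBin]
  rcases Nat.eq_zero_or_pos i with hi | hi
  · subst hi
    constructor
    · intro _; exact ⟨0, by norm_num⟩
    · intro _; decide
  · have hne : (i : Int) ≠ 0 := by omega
    rw [if_neg hne]
    have htn : (i : Int).toNat = i := by omega
    rw [htn]
    constructor
    · intro h
      have hlen : (PySem.Set.ofList (pyBinDigits i)).length = 1 := by
        simp [PySem.Set.len] at h
        omega
      obtain ⟨a, ha⟩ := List.length_eq_one_iff.mp hlen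
      have hmem : ∀ x ∈ pyBinDigits i, x = a := by
        intro x hx
        have : x ∈ PySem.Set.ofList (pyBinDigits i) := (PySem.Set.mem_ofList _ _).mpr hx
        rw [ha] at this
        simpa using this
      have h1 : a = '1' := (hmem '1' (one_mem_pyBinDigits i hi)).symm
      subst h1
      have hrep : pyBinDigits i = List.replicate (pyBinDigits i).length '1' :=
        List.eq_replicate_of_mem hmem
      exact ⟨(pyBinDigits i).length, pyBinDigits_rev i _ hrep⟩
    · rintro ⟨k, hk⟩
      have hk1 : 1 ≤ k := by
        rcases Nat.eq_zero_or_pos k with h0 | h1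
        · subst h0; omega
        · exact h1
      have hdig : pyBinDigits i = List.replicate k '1' := by
        have : i = 2 ^ k - 1 := by have := Nat.one_le_two_pow (n := k); omega
        rw [this, pyBinDigits_pow]
      rw [hdig]
      have : PySem.Set.ofList (List.replicate k '1') = ['1'] := by
        apply ofList_const
        · intro x hx; exact List.eq_of_mem_replicate hx
        · simp; omega
      rw [this]
      rfl

-- counting: the number of monobit integers below m + 1 grows by one exactly at powers of two
lemma size_succ (m : Nat) : Nat.size (m + 1) = Nat.size m + (if isMonoN m then 1 else 0) := by
  by_cases h : isMonoN m = true
  · obtain ⟨k, hk⟩ := (isMonoN_iff m).mp h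
    rw [if_pos h, hk]
    rw [Nat.size_pow]
    rcases Nat.eq_zero_or_pos k with h0 | hpos
    · subst h0
      have : m = 0 := by omega
      subst this
      simp
    · have h1 : 1 ≤ 2 ^ k := Nat.one_le_two_pow
      have hle : Nat.size m ≤ k := Nat.size_le.mpr (by omega)
      have hge : k - 1 < Nat.size m := Nat.lt_size.mpr (by
        have h2 : 2 ^ k = 2 ^ (k - 1) * 2 := by
          conv_lhs => rw [show k = (k - 1) + 1 from by omega]
          rw [pow_succ]
        have h3 : 1 ≤ 2 ^ (k - 1) := Nat.one_le_two_pow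
        omega)
      omega
  · rw [if_neg h]
    have hmono : ¬ ∃ k, m + 1 = 2 ^ k := fun hex => h ((isMonoN_iff m).mpr hex)
    have hle : Nat.size m ≤ Nat.size (m + 1) := Nat.size_le_size (by omega)
    rcases Nat.lt_or_ge (Nat.size m) (Nat.size (m + 1)) with hlt | hge
    · exfalso
      have h1 : 2 ^ (Nat.size m) ≤ m + 1 := Nat.lt_size.mp hlt
      have h2 : m < 2 ^ (Nat.size m) := Nat.lt_size_self m
      exact hmono ⟨Nat.size m, by omega⟩
    · omega

lemma count_size (m : Nat) : (List.range m).countP isMonoN = Nat.size m := by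
  induction m with
  | zero => simp
  | succ m ih =>
    rw [List.range_succ, List.countP_append, ih, size_succ]
    simp [List.countP_cons]

-- A computes Nat.size ((n+1).toNat)
lemma countMonobit_eq_size (n : Int) : countMonobit n = ((Nat.size (n + 1).toNat : Nat) : Int) := by
  have hA : countMonobit n =
      (PySem.List.pyRange 0 (n + 1) 1).foldl
        (fun acc x => if isMonoB x then acc + 1 else acc) 0 := rfl
  rw [hA, PySem.List.foldl_count_if, PySem.List.pyRange_one, List.countP_map]
  have : ((fun x => isMonoB x) ∘ fun k : Nat => 0 + (k : Int)) = isMonoN := by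
    funext k
    simp [isMonoN]
  rw [this, count_size]
  simp

-- B's loop counts the remaining all-ones numbers 2^(k+1) - 1, 2^(k+2) - 1, … up to n
lemma loopB_eq (n : Int) (hn : 0 ≤ n) :
    ∀ (d k : Nat) (c : Int), Nat.size (n + 1).toNat - (k + 1) = d →
      loopB n (2 ^ (k + 1) - 1) c = c + (d : Int) := by
  intro d
  induction d with
  | zero =>
    intro k c hd
    rw [loopB]
    have h1 : 1 ≤ 2 ^ (k + 1) := Nat.one_le_two_pow
    have hcond : ¬ ((2 ^ (k + 1) - 1 : Nat) : Int) ≤ n := by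
      intro hle
      rw [Nat.cast_sub h1, Nat.cast_one] at hle
      have hsz : 2 ^ (k + 1) ≤ (n + 1).toNat := by omega
      have := Nat.lt_size.mpr hsz
      omega
    rw [if_neg hcond]
    simp
  | succ d ihd =>
    intro k c hd
    rw [loopB]
    have hklt : k + 1 < Nat.size (n + 1).toNat := by omega
    have h1 : 1 ≤ 2 ^ (k + 1) := Nat.one_le_two_pow
    have hpow : 2 ^ (k + 1) ≤ (n + 1).toNat := Nat.lt_size.mp hklt
    have hcond : ((2 ^ (k + 1) - 1 : Nat) : Int) ≤ n := by
      rw [Nat.cast_sub h1, Nat.cast_one]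
      have hc : ((2 ^ (k + 1) : Nat) : Int) ≤ ((n + 1).toNat : Int) := Nat.cast_le.mpr hpow
      omega
    rw [if_pos hcond]
    have hstep : 2 * (2 ^ (k + 1) - 1) + 1 = 2 ^ (k + 2) - 1 := by
      have h2 : 2 ^ (k + 2) = 2 * 2 ^ (k + 1) := by rw [pow_succ]; ring
      omega
    rw [hstep]
    rw [ihd (k + 1) (c + 1) (by omega)]
    rw [Nat.cast_add, Nat.cast_one]
    ring

-- ===== VERDICT (by name: the statement is the Claim_ definition above) =====
theorem countMonobit_spec : Claim_equal_countMonobit := by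
  intro n _
  unfold Spec_countMonobit countMonobit_alt
  rcases lt_or_ge n 0 with hn | hn
  · rw [if_pos hn]
    unfold countMonobit
    rw [PySem.List.pyRange_one_eq_nil (by omega)]
    rfl
  · rw [if_neg (by omega)]
    rw [countMonobit_eq_size n]
    have hsz : 1 ≤ Nat.size (n + 1).toNat := Nat.size_pos.mpr (by omega)
    have h := loopB_eq n hn (Nat.size (n + 1).toNat - 1) 0 1 (by omega)
    norm_num at h
    rw [h]
    omega
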